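-- pv_equiv track=rewrite | github.com/DikeH-Ai/Random-Scripts | HackerRank/happiness.py | happiness_guage
-- ===== SOURCE A (Python) =====
-- def happiness_guage(seta: set, setb: set, array: list) -> int:
--     happiness = 0
--     for i in array:
--         if i in seta:
--             happiness += 1
--         elif i in setb:
--             happiness -= 1
--     return happiness
-- ===== SOURCE B (Python) =====
-- def happiness_guage(seta: set, setb: set, array: list) -> int:
--     counts = {}
--     for i in array:
--         counts[i] = counts.get(i, 0) + 1
--     total = 0
--     for i, c in counts.items():
--         if i in seta:
--             total += c
--         elif i in setb:
--             total -= c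
--     return total
-- ===== Notes on version B (the rewrite author's own statement) =====
-- stated objective: alternative
-- what changed: B first builds a frequency table of the array in one pass, then scores each DISTINCT element once, weighting by its count, instead of A's per-element scan of the whole array.
import Mathlib
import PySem

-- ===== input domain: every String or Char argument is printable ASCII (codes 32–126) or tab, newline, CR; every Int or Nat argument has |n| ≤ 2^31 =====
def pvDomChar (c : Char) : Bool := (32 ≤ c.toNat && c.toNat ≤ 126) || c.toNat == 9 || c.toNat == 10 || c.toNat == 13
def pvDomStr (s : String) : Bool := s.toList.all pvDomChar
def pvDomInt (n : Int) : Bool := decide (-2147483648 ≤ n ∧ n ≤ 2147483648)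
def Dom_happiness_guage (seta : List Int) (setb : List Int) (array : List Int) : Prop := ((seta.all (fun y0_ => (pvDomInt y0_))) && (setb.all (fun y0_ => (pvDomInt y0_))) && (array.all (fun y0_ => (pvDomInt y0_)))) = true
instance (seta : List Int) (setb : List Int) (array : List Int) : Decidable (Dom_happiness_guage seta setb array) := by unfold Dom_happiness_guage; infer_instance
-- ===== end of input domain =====

-- B replaces A's per-element scan by a frequency table built once, then scores each distinct element weighted by its count (alternative decomposition, same exact result).

-- ===== PORT A =====
def happiness_guage (seta : List Int) (setb : List Int) (array : List Int) : Int :=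
  array.foldl (fun happiness i =>
    if seta.contains i then happiness + 1
    else if setb.contains i then happiness - 1
    else happiness) 0

-- ===== PORT B =====
def happiness_guage_alt (seta : List Int) (setb : List Int) (array : List Int) : Int :=
  -- counts[i] = counts.get(i, 0) + 1  over the array
  let counts : PySem.Dict Int Int :=
    array.foldl (fun d i => d.insert i (d.getD i 0 + 1)) PySem.Dict.empty
  -- for i, c in counts.items(): …
  counts.items.foldl (fun total p =>
    if seta.contains p.1 then total + p.2
    else if setb.contains p.1 then total - p.2
    else total) 0

-- ===== PRECONDITION & SPEC =====
def Spec_happiness_guage (seta : List Int) (setb : List Int) (array : List Int) (out : Int) : Prop := out = happiness_guage_alt seta setb array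
instance (seta : List Int) (setb : List Int) (array : List Int) (out : Int) : Decidable (Spec_happiness_guage seta setb array out) := by unfold Spec_happiness_guage; infer_instance

-- ===== CLAIM (what is proved, stated in full; the proofs are below) =====
def Claim_equal_happiness_guage : Prop := ∀ (seta : List Int) (setb : List Int) (array : List Int), Dom_happiness_guage seta setb array → Spec_happiness_guage seta setb array (happiness_guage seta setb array)

-- ===== LEMMAS AND PROOFS =====

-- the per-element weight both programs realise
def pvW (seta setb : List Int) (i : Int) : Int :=
  if seta.contains i then 1 else if setb.contains i then -1 else 0

lemma sum_ite_of_not_mem (l : List Int) (x : Int) (w : Int → Int) (hx : x ∉ l) :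
    (l.map (fun k => if k = x then w k else 0)).sum = 0 := by
  apply List.sum_eq_zero
  intro y hy
  rcases List.mem_map.1 hy with ⟨k, hk, rfl⟩
  have : k ≠ x := fun h => hx (h ▸ hk)
  simp [this]

lemma sum_ite_of_nodup (l : List Int) (hnd : l.Nodup) (x : Int) (w : Int → Int)
    (hx : x ∈ l) :
    (l.map (fun k => if k = x then w k else 0)).sum = w x := by
  induction l with
  | nil => cases hx
  | cons a t ih =>
    rcases List.nodup_cons.1 hnd with ⟨hat, hnt⟩
    by_cases hax : a = x
    · subst hax
      simp [sum_ite_of_not_mem t a w hat]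
    · have hxt : x ∈ t := by
        rcases List.mem_cons.1 hx with h | h
        · exact absurd h.symm hax
        · exact h
      simp [hax, ih hnt hxt]

-- main counting lemma: summing the weight over the array equals summing
-- count·weight over the distinct elements
lemma sum_dedup_count (w : Int → Int) (xs : List Int) :
    ((PySem.Set.ofList xs).map (fun k => ((xs.count k : Int)) * w k)).sum
      = (xs.map w).sum := by
  induction xs using List.reverseRecOn with
  | nil => simp [PySem.Set.ofList]
  | append_singleton xs x ih =>
    have hc : ∀ k : Int, ((xs ++ [x]).count k : Int) * w k
        = (xs.count k : Int) * w k + (if k = x then w k else 0) := by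
      intro k
      by_cases hkx : k = x
      · subst hkx; simp [List.count_append]; ring
      · have h0 : List.count k [x] = 0 := by simp [List.count_singleton']; exact fun h => hkx h.symm
        rw [List.count_append, h0, if_neg hkx]
        push_cast; ring
    rw [PySem.Set.ofList_append_singleton]
    by_cases hx : x ∈ xs
    · have hmem : x ∈ PySem.Set.ofList xs := (PySem.Set.mem_ofList _ _).2 hx
      rw [PySem.Set.add_of_mem hmem]
      calc ((PySem.Set.ofList xs).map (fun k => ((xs ++ [x]).count k : Int) * w k)).sum
          = ((PySem.Set.ofList xs).map
              (fun k => (xs.count k : Int) * w k + (if k = x then w k else 0))).sum := by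
            exact congrArg List.sum (List.map_congr_left (fun k _ => hc k))
        _ = ((PySem.Set.ofList xs).map (fun k => (xs.count k : Int) * w k)).sum
              + ((PySem.Set.ofList xs).map (fun k => if k = x then w k else 0)).sum := by
            rw [← List.sum_map_add]
        _ = (xs.map w).sum + w x := by
            rw [ih, sum_ite_of_nodup _ (PySem.Set.nodup_ofList xs) x w hmem]
        _ = ((xs ++ [x]).map w).sum := by simp
    · have hnmem : x ∉ PySem.Set.ofList xs := fun h => hx ((PySem.Set.mem_ofList _ _).1 h)
      rw [PySem.Set.add_of_not_mem hnmem, List.map_append, List.sum_append]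
      have h1 : ((PySem.Set.ofList xs).map (fun k => ((xs ++ [x]).count k : Int) * w k)).sum
          = (xs.map w).sum := by
        rw [← ih]
        apply congrArg List.sum
        apply List.map_congr_left
        intro k hk
        have hne : k ≠ x := fun h => hnmem (h ▸ hk)
        have h0 : List.count k [x] = 0 := by simp [List.count_singleton']; exact fun h => hne h.symm
        rw [List.count_append, h0]
        simp
      have h2 : (([x] : List Int).map (fun k => ((xs ++ [x]).count k : Int) * w k)).sum = w x := by
        simp [List.count_append, List.count_eq_zero.2 hx]
      rw [h1, h2]; simp

-- A is the weight-sum over the array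
lemma happiness_guage_eq_sum (seta setb array : List Int) :
    happiness_guage seta setb array = (array.map (pvW seta setb)).sum := by
  unfold happiness_guage
  have h1 := PySem.List.foldl_congr_mem (l := array) (init := (0 : Int))
      (f := fun (h : Int) (i : Int) =>
        if seta.contains i then h + 1 else if setb.contains i then h - 1 else h)
      (g := fun (h : Int) (i : Int) => h + pvW seta setb i)
      (by intro h i _; dsimp only [pvW]; split_ifs <;> ring)
  rw [h1, PySem.List.foldl_add]
  ring

-- B is the count-weighted sum over the distinct elements
lemma happiness_guage_alt_eq_sum (seta setb array : List Int) :
    happiness_guage_alt seta setb array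
      = ((PySem.Set.ofList array).map
          (fun k => ((array.count k : Int)) * pvW seta setb k)).sum := by
  unfold happiness_guage_alt
  rw [PySem.Dict.foldl_insert_getD_add_one_eq_counter]
  show (List.foldl (fun total p =>
      if seta.contains p.1 then total + p.2
      else if setb.contains p.1 then total - p.2
      else total) 0 (PySem.Dict.counter array).items) = _
  rw [PySem.Dict.items_counter]
  have h1 := PySem.List.foldl_congr_mem
      (l := (PySem.Set.ofList array).map (fun k => (k, (array.count k : Int))))
      (init := (0 : Int))
      (f := fun (t : Int) (p : Int × Int) =>
        if seta.contains p.1 then t + p.2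
        else if setb.contains p.1 then t - p.2 else t)
      (g := fun (t : Int) (p : Int × Int) => t + p.2 * pvW seta setb p.1)
      (by intro t p _; dsimp only [pvW]; split_ifs <;> ring)
  rw [h1, PySem.List.foldl_add, List.map_map]
  have : ((fun (p : Int × Int) => p.2 * pvW seta setb p.1) ∘
      (fun k => (k, (array.count k : Int))))
      = fun k => (array.count k : Int) * pvW seta setb k := by
    funext k; simp
  rw [this]; ring

-- ===== VERDICT (by name: the statement is the Claim_ definition above) =====
theorem happiness_guage_spec : Claim_equal_happiness_guage := by
  intro seta setb array _
  unfold Spec_happiness_guage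
  rw [happiness_guage_eq_sum, happiness_guage_alt_eq_sum, sum_dedup_count]
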